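-- pv_equiv track=rewrite | github.com/kushalarora/stable_entropy_hypothesis | text_completion/score_generations.py | compute_ngram_repeats
-- ===== SOURCE A (Python) =====
-- def compute_ngram_repeats(prefix, generated, ngram_sz):
--     cgrams = {}
--     # compute N grams of the context
--     text = prefix.split()
--     for i in range((ngram_sz-1), len(text)):
--         ngram = ' '.join(text[i - (ngram_sz-1) : i + 1])
--         cgrams[ngram] = True
--
--     # compute N grams of the model response
--     creps = 0
--     lreps = 0
--
--     text = generated.split()
--     lgrams = {}
--     for i in range((ngram_sz-1), len(text)):
--         ngram = ' '.join(text[i - (ngram_sz-1) : i + 1])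
--         if ngram in cgrams:
--             creps = creps + 1
--         else:
--             if ngram in lgrams:
--                 lreps = lreps + 1
--         lgrams[ngram] = True
--     return creps + lreps
-- ===== SOURCE B (Python) =====
-- from collections import Counter
--
--
-- def compute_ngram_repeats(prefix, generated, ngram_sz):
--     k = ngram_sz - 1
--     ctext = prefix.split()
--     cset = set(' '.join(ctext[i - k : i + 1]) for i in range(k, len(ctext)))
--
--     gtext = generated.split()
--     counts = Counter(' '.join(gtext[i - k : i + 1]) for i in range(k, len(gtext)))
--
--     total = 0
--     for gram, c in counts.items():
--         total += c if gram in cset else c - 1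
--     return total
-- ===== Notes on version B (the rewrite author's own statement) =====
-- stated objective: simpler
-- what changed: A's incremental scan carrying a running seen-set with two branch counters is replaced by a Counter over all generated n-grams and one arithmetic pass over the distinct n-grams (full count for in-context grams, count-1 otherwise).
import Mathlib
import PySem

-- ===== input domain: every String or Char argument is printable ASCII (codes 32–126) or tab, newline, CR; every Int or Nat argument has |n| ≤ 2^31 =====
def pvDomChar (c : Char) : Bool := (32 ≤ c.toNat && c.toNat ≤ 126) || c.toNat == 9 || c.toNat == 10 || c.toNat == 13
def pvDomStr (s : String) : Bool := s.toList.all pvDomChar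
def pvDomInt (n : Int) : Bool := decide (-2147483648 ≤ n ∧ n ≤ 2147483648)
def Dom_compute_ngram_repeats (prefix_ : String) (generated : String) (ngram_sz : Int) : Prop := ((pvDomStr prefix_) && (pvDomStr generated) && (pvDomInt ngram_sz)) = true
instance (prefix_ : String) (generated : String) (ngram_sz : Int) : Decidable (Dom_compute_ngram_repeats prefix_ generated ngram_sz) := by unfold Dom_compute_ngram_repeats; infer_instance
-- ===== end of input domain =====

-- B replaces A's incremental scan with a running seen-dict by a Counter over all generated
-- n-grams plus one arithmetic pass over the distinct n-grams (simpler decomposition, same cost).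

-- ===== PORT A =====
def compute_ngram_repeats (prefix_ : String) (generated : String) (ngram_sz : Int) : Int :=
  let text := PySem.Str.split₀ prefix_
  let cgrams : PySem.Dict String Bool :=
    (PySem.List.pyRange (ngram_sz - 1) (PySem.List.len text) 1).foldl
      (fun d i =>
        d.insert (PySem.Str.join " " (PySem.List.slice text (some (i - (ngram_sz - 1))) (some (i + 1)))) true)
      PySem.Dict.empty
  let text2 := PySem.Str.split₀ generated
  let st :=
    (PySem.List.pyRange (ngram_sz - 1) (PySem.List.len text2) 1).foldl
      (fun (s : Int × Int × PySem.Dict String Bool) i =>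
        let ngram := PySem.Str.join " " (PySem.List.slice text2 (some (i - (ngram_sz - 1))) (some (i + 1)))
        let s1 := if cgrams.contains ngram then (s.1 + 1, s.2.1, s.2.2)
                  else if s.2.2.contains ngram then (s.1, s.2.1 + 1, s.2.2)
                  else s
        (s1.1, s1.2.1, s1.2.2.insert ngram true))
      (0, 0, PySem.Dict.empty)
  st.1 + st.2.1

-- ===== PORT B =====
def compute_ngram_repeats_alt (prefix_ : String) (generated : String) (ngram_sz : Int) : Int :=
  let k := ngram_sz - 1
  let ctext := PySem.Str.split₀ prefix_
  let cset : PySem.Set String :=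
    PySem.Set.ofList ((PySem.List.pyRange k (PySem.List.len ctext) 1).map
      (fun i => PySem.Str.join " " (PySem.List.slice ctext (some (i - k)) (some (i + 1)))))
  let gtext := PySem.Str.split₀ generated
  let counts := PySem.Dict.counter ((PySem.List.pyRange k (PySem.List.len gtext) 1).map
      (fun i => PySem.Str.join " " (PySem.List.slice gtext (some (i - k)) (some (i + 1)))))
  counts.items.foldl (fun total kv => total + (if PySem.Set.contains cset kv.1 then kv.2 else kv.2 - 1)) 0

-- ===== PRECONDITION & SPEC =====
def Spec_compute_ngram_repeats (prefix_ : String) (generated : String) (ngram_sz : Int) (out : Int) : Prop := out = compute_ngram_repeats_alt prefix_ generated ngram_sz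
instance (prefix_ : String) (generated : String) (ngram_sz : Int) (out : Int) : Decidable (Spec_compute_ngram_repeats prefix_ generated ngram_sz out) := by unfold Spec_compute_ngram_repeats; infer_instance

-- ===== CLAIM (what is proved, stated in full; the proofs are below) =====
def Claim_equal_compute_ngram_repeats : Prop := ∀ (prefix_ : String) (generated : String) (ngram_sz : Int), Dom_compute_ngram_repeats prefix_ generated ngram_sz → Spec_compute_ngram_repeats prefix_ generated ngram_sz (compute_ngram_repeats prefix_ generated ngram_sz)

-- ===== LEMMAS AND PROOFS =====

-- Reference count: process the grams left to right; a gram scores 1 if it is in the context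
-- (P) or was already seen (Q, grown as we go), else 0.
def specRep (P : String → Bool) : (String → Bool) → List String → Int
  | _, [] => 0
  | Q, g :: t => (if P g then 1 else if Q g then 1 else 0) + specRep P (fun x => (x == g) || Q x) t

theorem specRep_append (P : String → Bool) (xs : List String) :
    ∀ (Q : String → Bool) (ys : List String),
      specRep P Q (xs ++ ys) = specRep P Q xs + specRep P (fun x => decide (x ∈ xs) || Q x) ys := by
  induction xs with
  | nil =>
      intro Q ys
      simp [specRep]
  | cons g t ih =>
      intro Q ys
      simp only [List.cons_append, specRep]
      rw [ih]
      have hQ : (fun x => decide (x ∈ t) || ((x == g) || Q x))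
          = (fun x => decide (x ∈ g :: t) || Q x) := by
        funext x
        by_cases hx : x = g <;> by_cases hm : x ∈ t <;> simp [hx, hm]
      rw [hQ]; ring

theorem count_nodup_of_mem {α : Type} [BEq α] [LawfulBEq α] {xs : List α} {a : α}
    (hn : xs.Nodup) (ha : a ∈ xs) : xs.count a = 1 := by
  have h1 : xs.count a ≤ 1 := List.nodup_iff_count_le_one.mp hn a
  have h2 : 1 ≤ xs.count a := List.one_le_count_iff.mpr ha
  omega

theorem specRep_eq_counter_sum (P Q : String → Bool) (gs : List String) :
    specRep P Q gs =
      ((PySem.Set.ofList gs).map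
        (fun k => if P k then (gs.count k : Int) else (gs.count k : Int) - (if Q k then 0 else 1))).sum := by
  induction gs using List.reverseRecOn with
  | nil => simp [specRep, PySem.Set.ofList]
  | append_singleton xs g ih =>
      rw [specRep_append]
      have hone : specRep P (fun x => decide (x ∈ xs) || Q x) [g]
          = (if P g then 1 else if (decide (g ∈ xs) || Q g) then 1 else 0) := by
        simp [specRep]
      rw [hone, ih]
      have hset : PySem.Set.ofList (xs ++ [g]) = PySem.Set.add (PySem.Set.ofList xs) g := by
        rw [PySem.Set.ofList_eq_foldl, PySem.Set.ofList_eq_foldl, List.foldl_append]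
        rfl
      by_cases hg : g ∈ xs
      · -- g already occurs: the set is unchanged, only g's count grows by one
        have hadd : PySem.Set.add (PySem.Set.ofList xs) g = PySem.Set.ofList xs := by
          have : PySem.Set.contains (PySem.Set.ofList xs) g = true := by
            rw [PySem.Set.contains_iff]
            exact (PySem.Set.mem_ofList xs g).mpr hg
          simp [PySem.Set.add, hg]
        rw [hset, hadd]
        have hmap : (PySem.Set.ofList xs).map
              (fun k => if P k then ((xs ++ [g]).count k : Int)
                        else ((xs ++ [g]).count k : Int) - (if Q k then 0 else 1))
            = (PySem.Set.ofList xs).map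
              (fun k => (if P k then (xs.count k : Int) else (xs.count k : Int) - (if Q k then 0 else 1))
                + (if k == g then 1 else 0)) := by
          apply List.map_congr_left
          intro k _
          have hc : ((xs ++ [g]).count k : Int) = (xs.count k : Int) + (if k == g then 1 else 0) := by
            rw [List.count_append]
            by_cases hkg : k = g
            · subst hkg; simp
            · have hgk : ¬ g = k := fun h => hkg h.symm
              simp [hgk, hkg]
          rw [hc]
          by_cases hp : P k
          · simp [hp]
          · simp [hp]; ring
        rw [hmap, PySem.List.sum_map_add_int, PySem.List.sum_map_ite_one_zero]
        have hcount : (PySem.Set.ofList xs).countP (fun k => k == g) = 1 := by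
          have := count_nodup_of_mem (PySem.Set.nodup_ofList xs)
            ((PySem.Set.mem_ofList xs g).mpr hg)
          simpa [List.count] using this
        rw [hcount]
        simp [hg]
      · -- g is new: the set gains g at the end, old counts are unchanged
        have hadd : PySem.Set.add (PySem.Set.ofList xs) g = PySem.Set.ofList xs ++ [g] := by
          have : PySem.Set.contains (PySem.Set.ofList xs) g = false := by
            rw [Bool.eq_false_iff]
            intro hc; exact hg ((PySem.Set.mem_ofList xs g).mp ((PySem.Set.contains_iff _ _).mp hc))
          simp [PySem.Set.add, hg]
        rw [hset, hadd, List.map_append, List.sum_append]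
        have hmap : (PySem.Set.ofList xs).map
              (fun k => if P k then ((xs ++ [g]).count k : Int)
                        else ((xs ++ [g]).count k : Int) - (if Q k then 0 else 1))
            = (PySem.Set.ofList xs).map
              (fun k => if P k then (xs.count k : Int) else (xs.count k : Int) - (if Q k then 0 else 1)) := by
          apply List.map_congr_left
          intro k hk
          have hkg : k ≠ g := by
            intro h; exact hg (h ▸ (PySem.Set.mem_ofList xs k).mp hk)
          have hc : (xs ++ [g]).count k = xs.count k := by
            rw [List.count_append]
            have hgk : ¬ g = k := fun h => hkg h.symm
            simp [hgk]
          rw [hc]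
        rw [hmap]
        have hcg : xs.count g = 0 := List.count_eq_zero.mpr hg
        simp [hcg, hg]
        by_cases hp : P g <;> by_cases hq : Q g <;> simp [hp, hq]

theorem loopA_eq_specRep (P : String → Bool) (gs : List String) :
    ∀ (c l : Int) (d : PySem.Dict String Bool),
      ((gs.foldl
          (fun (s : Int × Int × PySem.Dict String Bool) g =>
            ((if P g then (s.1 + 1, s.2.1, s.2.2)
              else if s.2.2.contains g then (s.1, s.2.1 + 1, s.2.2) else s).1,
             (if P g then (s.1 + 1, s.2.1, s.2.2)
              else if s.2.2.contains g then (s.1, s.2.1 + 1, s.2.2) else s).2.1,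
             (if P g then (s.1 + 1, s.2.1, s.2.2)
              else if s.2.2.contains g then (s.1, s.2.1 + 1, s.2.2) else s).2.2.insert g true)) (c, l, d)).1
        + (gs.foldl
          (fun (s : Int × Int × PySem.Dict String Bool) g =>
            ((if P g then (s.1 + 1, s.2.1, s.2.2)
              else if s.2.2.contains g then (s.1, s.2.1 + 1, s.2.2) else s).1,
             (if P g then (s.1 + 1, s.2.1, s.2.2)
              else if s.2.2.contains g then (s.1, s.2.1 + 1, s.2.2) else s).2.1,
             (if P g then (s.1 + 1, s.2.1, s.2.2)
              else if s.2.2.contains g then (s.1, s.2.1 + 1, s.2.2) else s).2.2.insert g true)) (c, l, d)).2.1)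
      = c + l + specRep P (fun x => d.contains x) gs := by
  induction gs with
  | nil => intro c l d; simp [specRep]
  | cons g t ih =>
      intro c l d
      simp only [List.foldl_cons]
      have hd : (fun x => (d.insert g true).contains x) = (fun x => (x == g) || d.contains x) := by
        funext x; rw [PySem.Dict.contains_insert]
      rw [ih]
      by_cases hp : P g
      · simp only [specRep]
        simp [hp]
        rw [hd]
        ring
      · by_cases hs : d.contains g
        · simp only [specRep]
          simp [hp, hs]
          rw [hd]
          ring
        · simp only [specRep]
          simp [hp, hs]
          rw [hd]

theorem contains_foldl_insert (cs : List String) :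
    ∀ (d : PySem.Dict String Bool) (x : String),
      ((cs.foldl (fun d g => d.insert g true) d).contains x) = (d.contains x || decide (x ∈ cs)) := by
  induction cs with
  | nil => intro d x; simp
  | cons g t ih =>
      intro d x
      simp only [List.foldl_cons]
      rw [ih, PySem.Dict.contains_insert]
      by_cases hx : x = g <;> by_cases hm : x ∈ t <;> simp [hx, hm]

-- ===== VERDICT (by name: the statement is the Claim_ definition above) =====
theorem compute_ngram_repeats_spec : Claim_equal_compute_ngram_repeats := by
  intro prefix_ generated ngram_sz _
  unfold Spec_compute_ngram_repeats compute_ngram_repeats compute_ngram_repeats_alt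
  dsimp only
  -- name the two gram lists
  set k := ngram_sz - 1 with hk
  set ctext := PySem.Str.split₀ prefix_ with hct
  set gtext := PySem.Str.split₀ generated with hgt
  set cs := (PySem.List.pyRange k (PySem.List.len ctext) 1).map
      (fun i => PySem.Str.join " " (PySem.List.slice ctext (some (i - k)) (some (i + 1)))) with hcs
  set gs := (PySem.List.pyRange k (PySem.List.len gtext) 1).map
      (fun i => PySem.Str.join " " (PySem.List.slice gtext (some (i - k)) (some (i + 1)))) with hgs
  -- A side: folds over the ranges are folds over the mapped gram lists
  rw [← List.foldl_map (f := fun i => PySem.Str.join " " (PySem.List.slice ctext (some (i - k)) (some (i + 1))))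
        (g := fun (d : PySem.Dict String Bool) ngram => d.insert ngram true), ← hcs]
  set cgrams := cs.foldl (fun (d : PySem.Dict String Bool) g => d.insert g true) PySem.Dict.empty with hcg
  rw [← List.foldl_map (f := fun i => PySem.Str.join " " (PySem.List.slice gtext (some (i - k)) (some (i + 1))))
        (g := fun (s : Int × Int × PySem.Dict String Bool) ngram =>
          ((if cgrams.contains ngram = true then (s.1 + 1, s.2.1, s.2.2)
            else if s.2.2.contains ngram = true then (s.1, s.2.1 + 1, s.2.2) else s).1,
           (if cgrams.contains ngram = true then (s.1 + 1, s.2.1, s.2.2)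
            else if s.2.2.contains ngram = true then (s.1, s.2.1 + 1, s.2.2) else s).2.1,
           (if cgrams.contains ngram = true then (s.1 + 1, s.2.1, s.2.2)
            else if s.2.2.contains ngram = true then (s.1, s.2.1 + 1, s.2.2) else s).2.2.insert ngram true))]
  rw [← hgs]
  rw [loopA_eq_specRep (fun g => cgrams.contains g) gs 0 0 PySem.Dict.empty]
  -- B side: the Counter fold is a sum over the distinct grams
  rw [PySem.List.foldl_add]
  rw [PySem.Dict.items_counter, List.map_map]
  -- both sides are the same distinct-gram sum
  have hP : (fun g => cgrams.contains g) = (fun g => PySem.Set.contains (PySem.Set.ofList cs) g) := by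
    funext x
    rw [hcg, contains_foldl_insert]
    simp [PySem.Set.mem_ofList]
  have hQ : (fun x => (PySem.Dict.empty : PySem.Dict String Bool).contains x) = (fun _ : String => false) := by
    funext x; exact PySem.Dict.contains_empty x
  rw [hP, hQ, specRep_eq_counter_sum]
  simp [Function.comp_def]
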